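-- pv_equiv track=rewrite | github.com/jurgeon018/pki_bridge_main_service | src/pki_bridge/core/ldap.py | parse_search_output
-- ===== SOURCE A (Python) =====
-- def parse_search_output(lines):
--     result = [{}]
--     for line in lines:
--         line = line.rstrip()
--         if line == "":
--             result.append({})
--             continue
--         if line.count(':') > 1:
--             attr_split = line.split(":", 1)
--         else:
--             attr_split = line.split(":")
--         attr_name, attr_value = attr_split
--         attr_value = attr_value.strip()
--         attr_name = attr_name.strip()
--         result[len(result) - 1][attr_name] = attr_value
--     return [r for r in result if r != {}]
-- ===== SOURCE B (Python) =====
-- def parse_search_output(lines):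
--     # pass 1: partition the rstripped lines into blocks separated by blank lines
--     blocks = []
--     cur = []
--     for line in lines:
--         line = line.rstrip()
--         if line == "":
--             if cur:
--                 blocks.append(cur)
--             cur = []
--         else:
--             cur.append(line)
--     if cur:
--         blocks.append(cur)
--     # pass 2: turn each block into a dict (split each line at its first colon)
--     result = []
--     for block in blocks:
--         record = {}
--         for line in block:
--             attr_name, attr_value = line.split(":", 1)
--             record[attr_name.strip()] = attr_value.strip()
--         result.append(record)
--     return result
-- ===== Notes on version B (the rewrite author's own statement) =====
-- stated objective: alternative
-- what changed: A builds the records in one stateful loop that mutates the last dict of a growing list and filters out empty dicts at the end; B first partitions the rstripped lines into blank-separated blocks (skipping empty blocks) and then converts each block to a dict in a second pass.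
import Mathlib
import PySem

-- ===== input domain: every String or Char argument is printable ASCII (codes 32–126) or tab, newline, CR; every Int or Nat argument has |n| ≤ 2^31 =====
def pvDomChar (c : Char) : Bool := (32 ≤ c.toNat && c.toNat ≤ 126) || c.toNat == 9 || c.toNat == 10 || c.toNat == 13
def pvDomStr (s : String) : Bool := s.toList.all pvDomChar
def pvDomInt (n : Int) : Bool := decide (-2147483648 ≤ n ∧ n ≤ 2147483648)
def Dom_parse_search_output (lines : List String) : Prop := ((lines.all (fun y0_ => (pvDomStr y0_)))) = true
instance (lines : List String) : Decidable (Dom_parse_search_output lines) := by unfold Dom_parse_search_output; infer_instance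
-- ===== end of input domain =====

-- B re-implements A's single stateful loop as two passes (partition into blank-separated blocks, then one dict per block);
-- objective: alternative decomposition, same cost.

-- ===== PORT A =====
-- result[len(result)-1][k] = v : update the last element in place
def pvSetLast {α : Type} (f : α → α) : List α → List α
  | [] => []
  | [d] => [f d]
  | d :: rest => d :: pvSetLast f rest

-- the body of A's loop for a non-blank (already rstripped) line
def psoAIns (d : PySem.Dict String String) (line : String) : PySem.Dict String String :=
  let attr_split :=
    if PySem.Str.count line ":" > 1 then (PySem.Str.splitMax? line ":" 1).getD []
    else (PySem.Str.split? line ":").getD []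
  match attr_split with
  | [attr_name, attr_value] =>
      d.insert (PySem.Str.strip attr_name) (PySem.Str.strip attr_value)
  | _ => d   -- Python: ValueError on unpacking; excluded by Pre_

def psoAStep (result : List (PySem.Dict String String)) (line : String) :
    List (PySem.Dict String String) :=
  let line := PySem.Str.rstrip line
  if line = "" then result ++ [PySem.Dict.empty]
  else pvSetLast (fun d => psoAIns d line) result

def parse_search_output (lines : List String) : List (List (String × String)) :=
  ((lines.foldl psoAStep [PySem.Dict.empty]).filter
      (fun r => decide (r ≠ PySem.Dict.empty))).map PySem.Dict.items

-- ===== PORT B =====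
-- per block line: attr_name, attr_value = line.split(":", 1)
def psoBIns (d : PySem.Dict String String) (line : String) : PySem.Dict String String :=
  match (PySem.Str.splitMax? line ":" 1).getD [] with
  | [attr_name, attr_value] =>
      d.insert (PySem.Str.strip attr_name) (PySem.Str.strip attr_value)
  | _ => d   -- Python: ValueError on unpacking; excluded by Pre_

def psoBlockDict (block : List String) : PySem.Dict String String :=
  block.foldl psoBIns PySem.Dict.empty

-- pass 1 loop body: flush cur on a blank line, else extend cur
def psoBStep (st : List (List String) × List String) (line : String) :
    List (List String) × List String :=
  let line := PySem.Str.rstrip line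
  if line = "" then (if st.2.isEmpty then st.1 else st.1 ++ [st.2], [])
  else (st.1, st.2 ++ [line])

def parse_search_output_alt (lines : List String) : List (List (String × String)) :=
  let st := lines.foldl psoBStep ([], [])
  let blocks := if st.2.isEmpty then st.1 else st.1 ++ [st.2]
  blocks.map (fun block => (psoBlockDict block).items)

-- ===== PRECONDITION & SPEC =====
-- Pre_ excludes exactly the inputs where A raises ValueError: a line that is non-blank
-- after rstrip but contains no colon (unpacking its 1-element split fails).
def Pre_parse_search_output (lines : List String) : Prop :=
  ∀ s ∈ lines, PySem.Str.rstrip s = "" ∨ 1 ≤ PySem.Str.count (PySem.Str.rstrip s) ":"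
instance (lines : List String) : Decidable (Pre_parse_search_output lines) := by
  unfold Pre_parse_search_output; infer_instance

def pvWitness_parse_search_output : List String :=
  ["dn: cn=admin,dc=org", "objectClass: top", "  ", "cn: x:y", ""]

def Spec_parse_search_output (lines : List String) (out : List (List (String × String))) : Prop :=
  out = parse_search_output_alt lines
instance (lines : List String) (out : List (List (String × String))) :
    Decidable (Spec_parse_search_output lines out) := by
  unfold Spec_parse_search_output; infer_instance

-- ===== CLAIM (what is proved, stated in full; the proofs are below) =====
def Claim_equal_parse_search_output : Prop :=
  ∀ (lines : List String), Dom_parse_search_output lines → Pre_parse_search_output lines →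
    Spec_parse_search_output lines (parse_search_output lines)

-- ===== LEMMAS AND PROOFS =====

theorem pvSetLast_append {α : Type} (f : α → α) (xs : List α) (d : α) :
    pvSetLast f (xs ++ [d]) = xs ++ [f d] := by
  induction xs with
  | nil => rfl
  | cons x xs ih =>
      cases xs with
      | nil => rfl
      | cons y ys => simpa [pvSetLast] using ih

-- single-character count.go computes List.count
theorem count_go_single (c : Char) :
    ∀ (fuel : Nat) (l : List Char) (acc : Nat), l.length ≤ fuel →
      PySem.Chars.count.go [c] fuel l acc = acc + l.count c := by
  intro fuel
  induction fuel with
  | zero => intro l acc h; cases l with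
      | nil => simp [PySem.Chars.count.go]
      | cons x xs => simp at h
  | succ n ih =>
      intro l acc h
      cases l with
      | nil => simp [PySem.Chars.count.go]
      | cons x xs =>
          by_cases hx : x = c
          · subst hx
            simp only [PySem.Chars.count.go, List.isPrefixOf]
            rw [if_pos (by simp)]
            simp only [List.length_singleton, List.drop_succ_cons, List.drop_zero]
            rw [ih xs (acc + 1) (by simpa using h)]
            simp [List.count_cons]
            omega
          · simp only [PySem.Chars.count.go, List.isPrefixOf]
            rw [if_neg (by simp [beq_iff_eq]; exact fun hh => hx hh.symm)]
            rw [ih xs acc (by simpa using h)]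
            simp [hx]

theorem chars_count_single (l : List Char) (c : Char) :
    PySem.Chars.count l [c] = l.count c := by
  simp [PySem.Chars.count, count_go_single c l.length l 0 (le_refl _)]

-- first-colon decomposition of a list with at least one occurrence
theorem exists_first_split (c : Char) (l : List Char) (h : 1 ≤ l.count c) :
    ∃ a b, l = a ++ c :: b ∧ c ∉ a := by
  induction l with
  | nil => simp at h
  | cons x xs ih =>
      by_cases hx : x = c
      · exact ⟨[], xs, by simp [hx], by simp⟩
      · have : 1 ≤ xs.count c := by simpa [List.count_cons, hx] using h
        obtain ⟨a, b, hab, hna⟩ := ih this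
        refine ⟨x :: a, b, by simp [hab], ?_⟩
        intro hm
        rcases List.mem_cons.mp hm with hh | hh
        · exact hx hh.symm
        · exact hna hh

-- splitOn.go on a list without the separator
theorem splitOn_go_no_sep (c : Char) :
    ∀ (fuel : Nat) (l cur : List Char) (acc : List (List Char)), c ∉ l → l.length ≤ fuel →
      PySem.Chars.splitOn.go [c] fuel l cur acc = ((cur.reverse ++ l) :: acc).reverse := by
  intro fuel
  induction fuel with
  | zero => intro l cur acc hmem h; cases l with
      | nil => simp [PySem.Chars.splitOn.go]
      | cons x xs => simp at h
  | succ n ih =>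
      intro l cur acc hmem h
      cases l with
      | nil => simp [PySem.Chars.splitOn.go]
      | cons x xs =>
          have hx : ¬ x = c := fun hh => hmem (by simp [hh])
          simp only [PySem.Chars.splitOn.go, List.isPrefixOf]
          rw [if_neg (by simp [beq_iff_eq]; exact fun hh => hx hh.symm)]
          rw [ih xs (x :: cur) acc (fun hm => hmem (by simp [hm])) (by simpa using h)]
          simp

-- splitOn.go on a ++ c :: b, c ∉ a, c ∉ b
theorem splitOn_go_split (c : Char) (a : List Char) :
    ∀ (fuel : Nat) (b cur : List Char) (acc : List (List Char)),
      c ∉ a → c ∉ b → (a ++ c :: b).length ≤ fuel →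
      PySem.Chars.splitOn.go [c] fuel (a ++ c :: b) cur acc
        = acc.reverse ++ [cur.reverse ++ a, b] := by
  induction a with
  | nil =>
      intro fuel b cur acc hna hnb hf
      cases fuel with
      | zero => simp at hf
      | succ n =>
          simp only [List.nil_append, PySem.Chars.splitOn.go, List.isPrefixOf]
          rw [if_pos (by simp)]
          simp only [List.length_singleton, List.drop_succ_cons, List.drop_zero]
          rw [splitOn_go_no_sep c n b [] (cur.reverse :: acc) hnb (by simpa using hf)]
          simp
  | cons x a ih =>
      intro fuel b cur acc hna hnb hf
      cases fuel with
      | zero => simp at hf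
      | succ n =>
          have hx : ¬ x = c := fun hh => hna (by simp [hh])
          simp only [List.cons_append, PySem.Chars.splitOn.go, List.isPrefixOf]
          rw [if_neg (by simp [beq_iff_eq]; exact fun hh => hx hh.symm)]
          rw [ih n b (x :: cur) acc (fun hm => hna (by simp [hm])) hnb (by simpa using hf)]
          simp

-- splitOnMax.go with budget 0 returns the rest as one piece
theorem splitOnMax_go_zero (c : Char) (fuel : Nat) (l cur : List Char) (acc : List (List Char)) :
    PySem.Chars.splitOnMax.go [c] fuel 0 l cur acc = ((cur.reverse ++ l) :: acc).reverse := by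
  cases fuel with
  | zero => cases l <;> simp [PySem.Chars.splitOnMax.go]
  | succ n => cases l <;> simp [PySem.Chars.splitOnMax.go]

-- splitOnMax.go with budget 1 on a ++ c :: b, c ∉ a
theorem splitOnMax_go_one (c : Char) (a : List Char) :
    ∀ (fuel : Nat) (b cur : List Char) (acc : List (List Char)),
      c ∉ a → (a ++ c :: b).length ≤ fuel →
      PySem.Chars.splitOnMax.go [c] fuel 1 (a ++ c :: b) cur acc
        = acc.reverse ++ [cur.reverse ++ a, b] := by
  induction a with
  | nil =>
      intro fuel b cur acc hna hf
      cases fuel with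
      | zero => simp at hf
      | succ n =>
          simp only [List.nil_append, PySem.Chars.splitOnMax.go, List.isPrefixOf]
          rw [if_neg (by simp), if_pos (by simp)]
          simp only [List.length_singleton, List.drop_succ_cons, List.drop_zero]
          rw [splitOnMax_go_zero c n b [] (cur.reverse :: acc)]
          simp
  | cons x a ih =>
      intro fuel b cur acc hna hf
      cases fuel with
      | zero => simp at hf
      | succ n =>
          have hx : ¬ x = c := fun hh => hna (by simp [hh])
          simp only [List.cons_append, PySem.Chars.splitOnMax.go, List.isPrefixOf]
          rw [if_neg (by simp), if_neg (by simp [beq_iff_eq]; exact fun hh => hx hh.symm)]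
          rw [ih n b (x :: cur) acc (fun hm => hna (by simp [hm])) (by simpa using hf)]
          simp

theorem splitOnMax_one_eq (c : Char) (l : List Char) (h : 1 ≤ l.count c) :
    ∃ a b, PySem.Chars.splitOnMax l [c] 1 = [a, b] := by
  obtain ⟨a, b, hab, hna⟩ := exists_first_split c l h
  refine ⟨a, b, ?_⟩
  have : ¬ ((1 : Int) < 0) := by norm_num
  simp only [PySem.Chars.splitOnMax, if_neg this]
  subst hab
  rw [show ((1:Int).toNat) = 1 from rfl,
      splitOnMax_go_one c a _ b [] [] hna (by simp)]
  simp

theorem splitOn_eq_splitOnMax_one (c : Char) (l : List Char) (h : l.count c = 1) :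
    PySem.Chars.splitOn l [c] = PySem.Chars.splitOnMax l [c] 1 := by
  obtain ⟨a, b, hab, hna⟩ := exists_first_split c l (by omega)
  have hnb : c ∉ b := by
    subst hab
    have h' := h
    simp [List.count_append] at h'
    have hb : b.count c = 0 := by omega
    simpa [List.count_eq_zero] using hb
  have h1 : PySem.Chars.splitOn l [c] = [a, b] := by
    subst hab
    simp only [PySem.Chars.splitOn]
    rw [splitOn_go_split c a _ b [] [] hna hnb (by simp)]
    simp
  have h2 : PySem.Chars.splitOnMax l [c] 1 = [a, b] := by
    have : ¬ ((1 : Int) < 0) := by norm_num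
    subst hab
    simp only [PySem.Chars.splitOnMax, if_neg this]
    rw [show ((1:Int).toNat) = 1 from rfl,
        splitOnMax_go_one c a _ b [] [] hna (by simp)]
    simp
  rw [h1, h2]

-- Str-level bridge facts for sep = ":"
theorem str_count_colon (s : String) : PySem.Str.count s ":" = s.toList.count ':' := by
  have : (":" : String).toList = [':'] := rfl
  simp [PySem.Str.count, this, chars_count_single]

theorem str_split_eq_splitMax_one (s : String) (h : PySem.Str.count s ":" = 1) :
    PySem.Str.split? s ":" = PySem.Str.splitMax? s ":" 1 := by
  have hc : s.toList.count ':' = 1 := by rw [← str_count_colon s]; exact h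
  have hl : (":" : String).toList = [':'] := rfl
  simp only [PySem.Str.split?, PySem.Str.splitMax?, PySem.Chars.split?, PySem.Chars.splitMax?, hl]
  rw [splitOn_eq_splitOnMax_one ':' s.toList hc]

theorem str_splitMax_two (s : String) (h : 1 ≤ PySem.Str.count s ":") :
    ∃ n v, PySem.Str.splitMax? s ":" 1 = some [n, v] := by
  have hc : 1 ≤ s.toList.count ':' := by rw [← str_count_colon s]; exact h
  obtain ⟨a, b, hab⟩ := splitOnMax_one_eq ':' s.toList hc
  refine ⟨String.ofList a, String.ofList b, ?_⟩
  have hl : (":" : String).toList = [':'] := rfl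
  simp [PySem.Str.splitMax?, PySem.Chars.splitMax?, hl, hab]

-- the two per-line parses agree on lines that contain a colon
theorem aIns_eq_bIns (d : PySem.Dict String String) (l : String)
    (h : 1 ≤ PySem.Str.count l ":") : psoAIns d l = psoBIns d l := by
  have hcc : PySem.Chars.count l.toList [':'] = PySem.Str.count l ":" := by
    rw [chars_count_single, str_count_colon]
  by_cases hgt : PySem.Str.count l ":" > 1
  · have hgt' : 1 < PySem.Chars.count l.toList [':'] := by rw [hcc]; exact hgt
    simp [psoAIns, psoBIns, hgt']
  · have h1 : PySem.Str.count l ":" = 1 := by omega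
    have hgt' : ¬ 1 < PySem.Chars.count l.toList [':'] := by rw [hcc]; omega
    simp [psoAIns, psoBIns, hgt', str_split_eq_splitMax_one l h1]

-- inserting never yields the empty dict
theorem insert_ne_empty (d : PySem.Dict String String) (k v : String) :
    d.insert k v ≠ PySem.Dict.empty := by
  intro hE
  have : (d.insert k v).items = [] := by rw [hE]; rfl
  rw [PySem.Dict.items_insert] at this
  by_cases hc : d.contains k = true
  · rw [if_pos hc] at this
    have : d.items = [] := by simpa using this
    have : d.contains k = false := by
      have hd : d = PySem.Dict.empty := PySem.Dict.ext (by simpa using this)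
      rw [hd]; simp
    simp_all
  · rw [if_neg hc] at this; simp at this

theorem bIns_ne_empty (d : PySem.Dict String String) (l : String) (hd : d ≠ PySem.Dict.empty) :
    psoBIns d l ≠ PySem.Dict.empty := by
  unfold psoBIns
  split
  · exact insert_ne_empty _ _ _
  · exact hd

theorem bIns_empty_ne (l : String) (h : 1 ≤ PySem.Str.count l ":") :
    psoBIns PySem.Dict.empty l ≠ PySem.Dict.empty := by
  obtain ⟨n, v, hs⟩ := str_splitMax_two l h
  unfold psoBIns
  rw [hs]
  exact insert_ne_empty _ _ _

theorem blockDict_foldl_ne (block : List String) :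
    ∀ d : PySem.Dict String String, d ≠ PySem.Dict.empty →
      block.foldl psoBIns d ≠ PySem.Dict.empty := by
  induction block with
  | nil => intro d hd; simpa using hd
  | cons x xs ih => intro d hd; exact ih _ (bIns_ne_empty d x hd)

theorem blockDict_ne_empty (block : List String)
    (h : ∀ l ∈ block, 1 ≤ PySem.Str.count l ":") (hne : block ≠ []) :
    psoBlockDict block ≠ PySem.Dict.empty := by
  cases block with
  | nil => exact absurd rfl hne
  | cons x xs =>
      unfold psoBlockDict
      simp only [List.foldl_cons]
      exact blockDict_foldl_ne xs _ (bIns_empty_ne x (h x (by simp)))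

-- the main loop invariant
theorem pso_loop (lines : List String) :
    ∀ (front : List (PySem.Dict String String)) (lastd : PySem.Dict String String)
      (blocks : List (List String)) (cur : List String),
      (∀ s ∈ lines, PySem.Str.rstrip s = "" ∨ 1 ≤ PySem.Str.count (PySem.Str.rstrip s) ":") →
      (∀ l ∈ cur, 1 ≤ PySem.Str.count l ":") →
      front.filter (fun r => decide (r ≠ PySem.Dict.empty)) = blocks.map psoBlockDict →
      lastd = psoBlockDict cur →
      ((lines.foldl psoAStep (front ++ [lastd])).filter
          (fun r => decide (r ≠ PySem.Dict.empty))).map PySem.Dict.items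
        = (let st := lines.foldl psoBStep (blocks, cur)
           (if st.2.isEmpty then st.1 else st.1 ++ [st.2]).map
             (fun block => (psoBlockDict block).items)) := by
  induction lines with
  | nil =>
      intro front lastd blocks cur _ hcur hfront hlast
      simp only [List.foldl_nil, List.filter_append]
      rw [hfront]
      by_cases hc : cur = []
      · subst hc
        have : lastd = PySem.Dict.empty := by simpa [psoBlockDict] using hlast
        subst this
        simp [List.map_map, Function.comp]
      · have hne : psoBlockDict cur ≠ PySem.Dict.empty := blockDict_ne_empty cur hcur hc
        have hce : cur.isEmpty = false := by simpa [List.isEmpty_iff] using hc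
        subst hlast
        simp [hne, hce, List.map_map, Function.comp]
  | cons line rest ih =>
      intro front lastd blocks cur hpre hcur hfront hlast
      have hpre' : ∀ s ∈ rest, PySem.Str.rstrip s = "" ∨
          1 ≤ PySem.Str.count (PySem.Str.rstrip s) ":" :=
        fun s hs => hpre s (by simp [hs])
      simp only [List.foldl_cons]
      by_cases hb : PySem.Str.rstrip line = ""
      · -- blank line: A appends an empty dict, B flushes cur
        have hA : psoAStep (front ++ [lastd]) line = (front ++ [lastd]) ++ [PySem.Dict.empty] := by
          simp [psoAStep, hb]
        have hB : psoBStep (blocks, cur) line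
            = (if cur.isEmpty then blocks else blocks ++ [cur], []) := by
          simp [psoBStep, hb]
        rw [hA, hB]
        apply ih (front ++ [lastd]) PySem.Dict.empty _ []
          hpre' (by simp) _ (by simp [psoBlockDict])
        rw [List.filter_append, hfront]
        by_cases hc : cur = []
        · subst hc
          have : lastd = PySem.Dict.empty := by simpa [psoBlockDict] using hlast
          subst this
          simp
        · have hne : psoBlockDict cur ≠ PySem.Dict.empty := blockDict_ne_empty cur hcur hc
          have hce : cur.isEmpty = false := by simpa [List.isEmpty_iff] using hc
          subst hlast
          simp [hne, hce]
      · -- non-blank line: A updates the last dict, B extends cur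
        have hcnt : 1 ≤ PySem.Str.count (PySem.Str.rstrip line) ":" := by
          rcases hpre line (by simp) with h | h
          · exact absurd h hb
          · exact h
        have hA : psoAStep (front ++ [lastd]) line
            = front ++ [psoAIns lastd (PySem.Str.rstrip line)] := by
          simp only [psoAStep, if_neg hb]
          exact pvSetLast_append _ front lastd
        have hB : psoBStep (blocks, cur) line = (blocks, cur ++ [PySem.Str.rstrip line]) := by
          simp [psoBStep, hb]
        rw [hA, hB]
        apply ih front _ blocks (cur ++ [PySem.Str.rstrip line]) hpre'
          (by intro l hl
              rcases List.mem_append.mp hl with h | h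
              · exact hcur l h
              · simp at h; subst h; exact hcnt)
          hfront
        rw [hlast, psoBlockDict, psoBlockDict, List.foldl_append, List.foldl_cons, List.foldl_nil]
        exact aIns_eq_bIns _ _ hcnt

-- ===== VERDICT (by name: the statement is the Claim_ definition above) =====
theorem parse_search_output_spec : Claim_equal_parse_search_output := by
  intro lines _ hpre
  unfold Spec_parse_search_output parse_search_output parse_search_output_alt
  have := pso_loop lines [] PySem.Dict.empty [] [] hpre (by simp) (by simp)
    (by simp [psoBlockDict])
  simpa using this
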